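-- pv_equiv track=rewrite | github.com/opendatacube/odc-tools | libs/stats/odc/stats/utils.py | mk_season_rules
-- ===== SOURCE A (Python) =====
-- from typing import Dict, Tuple, List, Any, Callable, Optional
--
-- def mk_season_rules(months: int, anchor: int) -> Dict[int, str]:
--     """
--     Construct rules for a regular seasons
--     :param months: Length of season in months can be one of (1,2,3,4,6,12)
--     :param anchor: Start month of one of the seasons [1, 12]
--     """
--     assert months in (1, 2, 3, 4, 6, 12)
--     assert 1 <= anchor <= 12
--
--     rules: Dict[int, str] = {}
--     for i in range(12 // months):
--         start_month = anchor + i * months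
--         if start_month > 12:
--             start_month -= 12
--
--         for m in range(start_month, start_month + months):
--             if m > 12:
--                 m = m - 12
--             if months == 12:
--                 rules[m] = f"{start_month:02d}--P1Y"
--             else:
--                 rules[m] = f"{start_month:02d}--P{months:d}M"
--
--     return rules
-- ===== SOURCE B (Python) =====
-- def mk_season_rules(months: int, anchor: int):
--     """Same mapping, but one flat loop: each of the 12 slots after the anchor is
--     assigned its season start by closed-form modular arithmetic."""
--     assert months in (1, 2, 3, 4, 6, 12)
--     assert 1 <= anchor <= 12
--     period = "P1Y" if months == 12 else f"P{months:d}M"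
--     rules = {}
--     for k in range(12):
--         m = (anchor - 1 + k) % 12 + 1
--         start = (anchor - 1 + k // months * months) % 12 + 1
--         rules[m] = f"{start:02d}--{period}"
--     return rules
-- ===== Notes on version B (the rewrite author's own statement) =====
-- stated objective: simpler
-- what changed: Replaced A's nested season/month loops and the post-hoc >12 wrap fixes with one flat loop over the 12 slots after the anchor, computing each month's season start by a closed-form modular expression.
import Mathlib
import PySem

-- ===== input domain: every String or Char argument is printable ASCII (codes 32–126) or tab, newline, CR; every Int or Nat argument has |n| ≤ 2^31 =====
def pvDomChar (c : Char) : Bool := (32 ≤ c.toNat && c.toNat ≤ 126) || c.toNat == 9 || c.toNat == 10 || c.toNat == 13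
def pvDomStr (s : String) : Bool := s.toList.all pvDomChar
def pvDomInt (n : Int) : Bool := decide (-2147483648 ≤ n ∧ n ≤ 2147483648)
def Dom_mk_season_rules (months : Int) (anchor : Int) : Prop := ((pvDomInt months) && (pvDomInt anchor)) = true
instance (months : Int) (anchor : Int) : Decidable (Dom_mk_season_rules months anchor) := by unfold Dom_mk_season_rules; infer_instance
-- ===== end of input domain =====

-- B replaces A's nested season/month loops by one flat 12-slot loop whose season start is a
-- closed-form modular expression (objective: simpler).


-- ===== PORT A =====
-- f"{n:02d}" for 0 ≤ n < 100 (exact on that range; both programs only format start months 1..12)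
def pvPad2 (n : Int) : String := if n < 10 then "0" ++ PySem.Int.toStr n else PySem.Int.toStr n

def mk_season_rules (months : Int) (anchor : Int) : List (Int × String) :=
  -- the two asserts are Pre_mk_season_rules
  ((PySem.List.pyRange 0 (PySem.Int.floordiv 12 months) 1).foldl (fun rules i =>
    let start_month := anchor + i * months
    let start_month := if start_month > 12 then start_month - 12 else start_month
    (PySem.List.pyRange start_month (start_month + months) 1).foldl (fun rules m =>
      let m := if m > 12 then m - 12 else m
      if months == 12 then
        rules.insert m (pvPad2 start_month ++ "--P1Y")
      else
        rules.insert m (pvPad2 start_month ++ "--P" ++ PySem.Int.toStr months ++ "M")) rules)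
    (PySem.Dict.empty : PySem.Dict Int String)).items

-- ===== PORT B =====

def mk_season_rules_alt (months : Int) (anchor : Int) : List (Int × String) :=
  let period := if months == 12 then "P1Y" else "P" ++ PySem.Int.toStr months ++ "M"
  ((PySem.List.pyRange 0 12 1).foldl (fun rules k =>
    let m := PySem.Int.mod (anchor - 1 + k) 12 + 1
    let start := PySem.Int.mod (anchor - 1 + PySem.Int.floordiv k months * months) 12 + 1
    rules.insert m (pvPad2 start ++ "--" ++ period))
    (PySem.Dict.empty : PySem.Dict Int String)).items

-- ===== PRECONDITION & SPEC =====
-- exactly A's two asserts: season length and anchor month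
def Pre_mk_season_rules (months : Int) (anchor : Int) : Prop :=
  (months = 1 ∨ months = 2 ∨ months = 3 ∨ months = 4 ∨ months = 6 ∨ months = 12) ∧
  1 ≤ anchor ∧ anchor ≤ 12
instance (months : Int) (anchor : Int) : Decidable (Pre_mk_season_rules months anchor) := by
  unfold Pre_mk_season_rules; infer_instance
def pvWitness_mk_season_rules : Int × Int := (3, 12)

def Spec_mk_season_rules (months : Int) (anchor : Int) (out : List (Int × String)) : Prop := out = mk_season_rules_alt months anchor
instance (months : Int) (anchor : Int) (out : List (Int × String)) : Decidable (Spec_mk_season_rules months anchor out) := by unfold Spec_mk_season_rules; infer_instance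

-- ===== CLAIM (what is proved, stated in full; the proofs are below) =====
def Claim_equal_mk_season_rules : Prop := ∀ (months : Int) (anchor : Int), Dom_mk_season_rules months anchor → Pre_mk_season_rules months anchor → Spec_mk_season_rules months anchor (mk_season_rules months anchor)

-- ===== LEMMAS AND PROOFS =====

-- ===== VERDICT (by name: the statement is the Claim_ definition above) =====
theorem mk_season_rules_spec : Claim_equal_mk_season_rules := by
  intro months anchor _ hpre
  obtain ⟨hm, h1, h2⟩ := hpre
  unfold Spec_mk_season_rules
  interval_cases anchor <;> rcases hm with h | h | h | h | h | h <;> subst h <;> decide
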